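-- pv_equiv track=rewrite | github.com/afc1755/HFVL | bitFunctions.py | bit_to_byte
-- ===== SOURCE A (Python) =====
-- BIT_BYTE = {'0000': '0', '0001': '1', '0010': '2', '0011': '3', '0100': '4', '0101': '5', '0110': '6', '0111': '7',
--             '1000': '8', '1001': '9', '1010': 'a', '1011': 'b', '1100': 'c', '1101': 'd', '1110': 'e', '1111': 'f'}
--
-- def bit_to_byte(in_bit):
--     in_bit = in_bit.replace(' ', '')
--     curr_bit = ''
--     in_byte = ''
--     for i in range(0, len(in_bit)):
--         curr_bit += in_bit[i]
--         if (i + 1) % 4 == 0: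
--             in_byte += BIT_BYTE[curr_bit]
--             curr_bit = ''
--             if (i + 1) % 8 == 0 and (i + 1) != len(in_bit):
--                 in_byte += ' '
--     return in_byte
-- ===== SOURCE B (Python) =====
-- HEX_DIGITS = '0123456789abcdef'
--
-- def bit_to_byte(in_bit):
--     s = in_bit.replace(' ', '')
--     n = len(s) // 4
--     digits = []
--     for k in range(n):
--         v = 0
--         for c in s[4 * k:4 * k + 4]:
--             v = 2 * v + (c == '1')
--         digits.append(HEX_DIGITS[v])
--     return ' '.join(''.join(digits[j:j + 2]) for j in range(0, n, 2))
-- ===== Notes on version B (the rewrite author's own statement) =====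
-- stated objective: simpler
-- what changed: Replaces A's per-character loop with modular counters and a BIT_BYTE dict by arithmetic: slice the stripped string into complete 4-bit nibbles, compute each nibble's numeric value by a small fold (2*v + bit) and index a hex-digit table (no dict), then space-join consecutive pairs of hex digits.
-- intended difference: On inputs whose space-stripped bit string has >= 8 bits and ends in a partial nibble after an even number of complete nibbles (stripped length % 4 != 0, length//4 even, length >= 8), A returns the hex bytes with a spurious trailing space while B returns them without it, the intended spaced-hex rendering. — e.g. on bit_to_byte("010101011"): A returns "55 ", B returns "55"
import Mathlib
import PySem

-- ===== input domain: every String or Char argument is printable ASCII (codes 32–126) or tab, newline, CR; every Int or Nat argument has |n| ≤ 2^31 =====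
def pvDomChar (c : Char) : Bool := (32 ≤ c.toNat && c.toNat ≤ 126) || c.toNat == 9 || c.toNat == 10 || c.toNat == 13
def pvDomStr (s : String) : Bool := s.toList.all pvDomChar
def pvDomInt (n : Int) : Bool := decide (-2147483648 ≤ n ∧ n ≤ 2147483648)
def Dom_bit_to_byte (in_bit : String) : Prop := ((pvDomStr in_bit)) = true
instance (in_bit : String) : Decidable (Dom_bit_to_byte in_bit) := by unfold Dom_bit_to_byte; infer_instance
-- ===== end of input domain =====

-- B drops A's dict and per-character counter loop: it slices whole nibbles, computes each
-- nibble's numeric value arithmetically (2*v + bit) and indexes a hex-digit table, then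
-- space-joins consecutive digit pairs; objective: simpler.  Strings are handled as their
-- char lists (String.ofList/toList).

-- A's module constant BIT_BYTE (keys/values as char lists); used only by port A.
def pvBB : PySem.Dict (List Char) (List Char) := PySem.Dict.ofList
  [(['0','0','0','0'], ['0']), (['0','0','0','1'], ['1']), (['0','0','1','0'], ['2']), (['0','0','1','1'], ['3']),
   (['0','1','0','0'], ['4']), (['0','1','0','1'], ['5']), (['0','1','1','0'], ['6']), (['0','1','1','1'], ['7']),
   (['1','0','0','0'], ['8']), (['1','0','0','1'], ['9']), (['1','0','1','0'], ['a']), (['1','0','1','1'], ['b']),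
   (['1','1','0','0'], ['c']), (['1','1','0','1'], ['d']), (['1','1','1','0'], ['e']), (['1','1','1','1'], ['f'])]

-- ===== PORT A =====
-- On a nibble not in BIT_BYTE, Python raises KeyError; the port returns the getD default []
-- there — exactly those inputs are excluded by Pre_bit_to_byte.
def bit_to_byte (in_bit : String) : String :=
  let l : List Char := (PySem.Str.replace in_bit " " "").toList
  let st := (PySem.List.pyRange 0 (PySem.List.len l) 1).foldl
    (fun (st : List Char × List Char) i =>
      let curr := st.1 ++ [PySem.List.pyGetD l i ' ']
      if PySem.Int.mod (i + 1) 4 = 0 then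
        let acc := st.2 ++ PySem.Dict.getD pvBB curr []
        let acc := if PySem.Int.mod (i + 1) 8 = 0 ∧ (i + 1) ≠ PySem.List.len l then acc ++ [' '] else acc
        ([], acc)
      else (curr, st.2)) ([], [])
  String.ofList st.2

-- ===== PORT B =====
-- B's module constant HEX_DIGITS.
def pvHex : List Char := ['0','1','2','3','4','5','6','7','8','9','a','b','c','d','e','f']

def bit_to_byte_alt (in_bit : String) : String :=
  let l : List Char := (PySem.Str.replace in_bit " " "").toList
  let n : Int := PySem.Int.floordiv (PySem.List.len l) 4
  let digits : List (List Char) := (PySem.List.pyRange 0 n 1).map (fun k =>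
    [PySem.List.pyGetD pvHex
      ((PySem.List.slice l (some (4*k)) (some (4*k + 4))).foldl
        (fun v c => 2*v + (if c = '1' then 1 else 0)) (0:Int)) ' '])
  String.ofList (PySem.Chars.join [' ']
    ((PySem.List.pyRange 0 n 2).map
      (fun j => (PySem.List.slice digits (some j) (some (j + 2))).flatten)))

-- ===== PRECONDITION & SPEC =====
-- Pre_ excludes exactly the inputs where Python A raises KeyError: a character that is not a
-- bit digit inside a COMPLETE 4-bit nibble of the space-stripped string.
def Pre_bit_to_byte (in_bit : String) : Prop :=
  ((((PySem.Str.replace in_bit " " "").toList).take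
      (4 * (((PySem.Str.replace in_bit " " "").toList).length / 4))).all
    (fun c => c == '0' || c == '1')) = true
instance (in_bit : String) : Decidable (Pre_bit_to_byte in_bit) := by unfold Pre_bit_to_byte; infer_instance
def pvWitness_bit_to_byte : String := "0000 11110"

-- D-region helper: stripped length with an incomplete trailing nibble after an even number
-- of complete nibbles (length % 4 ≠ 0, length / 4 even, length ≥ 8).
def pvD (n : Nat) : Bool := (n % 4 != 0) && (n / 4 % 2 == 0) && decide (8 ≤ n)

-- On inputs whose space-stripped bit string has ≥ 8 bits and ends in a partial nibble after an
-- even number of complete nibbles, A returns the hex bytes with a spurious trailing space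
-- (' ' emitted before bits that never form a nibble) while B returns them without it, which is
-- the intended spaced-hex rendering.
def D_bit_to_byte (in_bit : String) : Prop :=
  pvD ((PySem.Str.replace in_bit " " "").toList).length = true
instance (in_bit : String) : Decidable (D_bit_to_byte in_bit) := by unfold D_bit_to_byte; infer_instance

def Spec_bit_to_byte (in_bit : String) (out : String) : Prop :=
  ¬ D_bit_to_byte in_bit → out = bit_to_byte_alt in_bit
instance (in_bit : String) (out : String) : Decidable (Spec_bit_to_byte in_bit out) := by unfold Spec_bit_to_byte; infer_instance

def pvDiffWitness_bit_to_byte : String := "010101011"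
def pvDiffWitnessOut_bit_to_byte : String × String := ("55 ", "55")

-- ===== CLAIM (what is proved, stated in full; the proofs are below) =====
def Claim_unchanged_bit_to_byte : Prop := ∀ (in_bit : String), Dom_bit_to_byte in_bit → Pre_bit_to_byte in_bit → Spec_bit_to_byte in_bit (bit_to_byte in_bit)
def Claim_changed_bit_to_byte : Prop := Dom_bit_to_byte (pvDiffWitness_bit_to_byte) ∧ Pre_bit_to_byte (pvDiffWitness_bit_to_byte) ∧ D_bit_to_byte (pvDiffWitness_bit_to_byte) ∧ bit_to_byte (pvDiffWitness_bit_to_byte) = pvDiffWitnessOut_bit_to_byte.1 ∧ bit_to_byte_alt (pvDiffWitness_bit_to_byte) = pvDiffWitnessOut_bit_to_byte.2 ∧ pvDiffWitnessOut_bit_to_byte.1 ≠ pvDiffWitnessOut_bit_to_byte.2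
def Claim_exact_bit_to_byte : Prop := ∀ (in_bit : String), Dom_bit_to_byte in_bit → Pre_bit_to_byte in_bit → D_bit_to_byte in_bit → bit_to_byte in_bit ≠ bit_to_byte_alt in_bit

-- ===== LEMMAS AND PROOFS =====

-- hex digit of one nibble as A computes it (the dict lookup, with the port's KeyError default)
def hexNib (nb : List Char) : List Char := PySem.Dict.getD pvBB nb []

-- hex digit of one nibble as B computes it (arithmetic value into the HEX_DIGITS table)
def bDigit (nb : List Char) : List Char :=
  [PySem.List.pyGetD pvHex
    (nb.foldl (fun v c => 2*v + (if c = '1' then 1 else 0)) (0:Int)) ' ']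

-- A's loop, restated structurally: consume 8 chars (two nibbles) at a time.
def aRec : List Char → List Char
  | a :: b :: c :: d :: e :: f :: g :: h :: t =>
      hexNib [a, b, c, d] ++ hexNib [e, f, g, h] ++ (if t = [] then [] else [' '] ++ aRec t)
  | l => if l.length < 4 then [] else hexNib (l.take 4)

-- whole nibbles of a char list
def nibs : List Char → List (List Char)
  | a :: b :: c :: d :: t => [a, b, c, d] :: nibs t
  | _ => []

-- consecutive pairs, each pair concatenated
def chunk2 : List (List Char) → List (List Char)
  | h1 :: h2 :: t => (h1 ++ h2) :: chunk2 t
  | [h] => [h]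
  | [] => []

-- ' '.join of the pair groups, restated structurally
def bRecH : List (List Char) → List Char
  | h1 :: h2 :: t => h1 ++ h2 ++ (if t = [] then [] else [' '] ++ bRecH t)
  | [h] => h
  | [] => []

-- A's loop body, on (index, char) pairs (L = total stripped length)
def pvBody (L : Int) (st : List Char × List Char) (p : Int × Char) : List Char × List Char :=
  let curr := st.1 ++ [p.2]
  if PySem.Int.mod (p.1 + 1) 4 = 0 then
    let acc := st.2 ++ PySem.Dict.getD pvBB curr []
    let acc := if PySem.Int.mod (p.1 + 1) 8 = 0 ∧ (p.1 + 1) ≠ L then acc ++ [' '] else acc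
    ([], acc)
  else (curr, st.2)

theorem pvBody_mid (L : Int) (st : List Char × List Char) (i : Int) (c : Char)
    (h : ¬ (4 ∣ (i + 1))) : pvBody L st (i, c) = (st.1 ++ [c], st.2) := by
  simp [pvBody, h]

theorem pvBody_flush4 (L : Int) (st : List Char × List Char) (i : Int) (c : Char)
    (h4 : 4 ∣ (i + 1)) (h8 : ¬ (8 ∣ (i + 1))) :
    pvBody L st (i, c) = ([], st.2 ++ hexNib (st.1 ++ [c])) := by
  simp [pvBody, hexNib, h4, h8]

theorem pvBody_flush8 (L : Int) (st : List Char × List Char) (i : Int) (c : Char)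
    (h4 : 4 ∣ (i + 1)) (h8 : 8 ∣ (i + 1)) :
    pvBody L st (i, c) =
      ([], st.2 ++ hexNib (st.1 ++ [c]) ++ (if i + 1 = L then [] else [' '])) := by
  by_cases hL : i + 1 = L
  · subst hL; simp [pvBody, hexNib, h4, h8]
  · simp [pvBody, hexNib, h4, h8, hL]

theorem pv_aux (L : Int) (t : List Char) (k : Nat) (acc : List Char)
    (hk : k % 8 = 0) (hL : L = (k : Int) + t.length) :
    ((PySem.List.enumerate t (k : Int)).foldl (pvBody L) ([], acc)).2 = acc ++ aRec t := by
  induction t using aRec.induct generalizing k acc with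
  | case1 a b c d e f g h t ih =>
    have c1 : ¬ (4 ∣ ((k:Int) + 1)) := by omega
    have c2 : ¬ (4 ∣ ((k:Int) + 1 + 1)) := by omega
    have c3 : ¬ (4 ∣ ((k:Int) + 1 + 1 + 1)) := by omega
    have c4 : (4 ∣ ((k:Int) + 1 + 1 + 1 + 1)) := by omega
    have c4' : ¬ (8 ∣ ((k:Int) + 1 + 1 + 1 + 1)) := by omega
    have c5 : ¬ (4 ∣ ((k:Int) + 1 + 1 + 1 + 1 + 1)) := by omega
    have c6 : ¬ (4 ∣ ((k:Int) + 1 + 1 + 1 + 1 + 1 + 1)) := by omega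
    have c7 : ¬ (4 ∣ ((k:Int) + 1 + 1 + 1 + 1 + 1 + 1 + 1)) := by omega
    have c8 : (4 ∣ ((k:Int) + 1 + 1 + 1 + 1 + 1 + 1 + 1 + 1)) := by omega
    have c8' : (8 ∣ ((k:Int) + 1 + 1 + 1 + 1 + 1 + 1 + 1 + 1)) := by omega
    simp only [PySem.List.enumerate_cons, List.foldl_cons,
      pvBody_mid _ _ _ _ c1, pvBody_mid _ _ _ _ c2, pvBody_mid _ _ _ _ c3,
      pvBody_flush4 _ _ _ _ c4 c4',
      pvBody_mid _ _ _ _ c5, pvBody_mid _ _ _ _ c6, pvBody_mid _ _ _ _ c7,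
      pvBody_flush8 _ _ _ _ c8 c8', List.nil_append]
    simp only [List.length_cons] at hL
    by_cases ht : t = []
    · subst ht
      rw [if_pos (by simp at hL; omega)]
      simp [aRec, List.append_assoc]
    · have hlen : 0 < t.length := List.length_pos_iff.mpr ht
      rw [if_neg (by omega)]
      rw [show ((k:Int) + 1 + 1 + 1 + 1 + 1 + 1 + 1 + 1) = ((k + 8 : Nat) : Int) by push_cast; ring]
      rw [ih (k + 8) _ (by omega) (by push_cast; push_cast at hL; omega)]
      simp [aRec, ht, List.append_assoc]
  | case2 t hshape hlt =>
    have c1 : ¬ (4 ∣ ((k:Int) + 1)) := by omega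
    have c2 : ¬ (4 ∣ ((k:Int) + 1 + 1)) := by omega
    have c3 : ¬ (4 ∣ ((k:Int) + 1 + 1 + 1)) := by omega
    rcases t with _ | ⟨a, _ | ⟨b, _ | ⟨c, t⟩⟩⟩
    · simp [aRec]
    · simp only [PySem.List.enumerate_cons, List.foldl_cons, PySem.List.enumerate_nil,
        pvBody_mid _ _ _ _ c1, List.foldl_nil]
      simp [aRec]
    · simp only [PySem.List.enumerate_cons, List.foldl_cons, PySem.List.enumerate_nil,
        pvBody_mid _ _ _ _ c1, pvBody_mid _ _ _ _ c2, List.foldl_nil]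
      simp [aRec]
    · rcases t with _ | ⟨d, t⟩
      · simp only [PySem.List.enumerate_cons, List.foldl_cons, PySem.List.enumerate_nil,
          pvBody_mid _ _ _ _ c1, pvBody_mid _ _ _ _ c2, pvBody_mid _ _ _ _ c3, List.foldl_nil]
        simp [aRec]
      · simp only [List.length_cons] at hlt; omega
  | case3 t hshape hge =>
    have c1 : ¬ (4 ∣ ((k:Int) + 1)) := by omega
    have c2 : ¬ (4 ∣ ((k:Int) + 1 + 1)) := by omega
    have c3 : ¬ (4 ∣ ((k:Int) + 1 + 1 + 1)) := by omega
    have c4 : (4 ∣ ((k:Int) + 1 + 1 + 1 + 1)) := by omega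
    have c4' : ¬ (8 ∣ ((k:Int) + 1 + 1 + 1 + 1)) := by omega
    have c5 : ¬ (4 ∣ ((k:Int) + 1 + 1 + 1 + 1 + 1)) := by omega
    have c6 : ¬ (4 ∣ ((k:Int) + 1 + 1 + 1 + 1 + 1 + 1)) := by omega
    have c7 : ¬ (4 ∣ ((k:Int) + 1 + 1 + 1 + 1 + 1 + 1 + 1)) := by omega
    rcases t with _ | ⟨a, _ | ⟨b, _ | ⟨c, _ | ⟨d, _ | ⟨e, _ | ⟨f, _ | ⟨g, _ | ⟨h, t⟩⟩⟩⟩⟩⟩⟩⟩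
    · simp at hge
    · simp at hge
    · simp at hge
    · simp at hge
    · simp only [PySem.List.enumerate_cons, List.foldl_cons, PySem.List.enumerate_nil,
        pvBody_mid _ _ _ _ c1, pvBody_mid _ _ _ _ c2, pvBody_mid _ _ _ _ c3,
        pvBody_flush4 _ _ _ _ c4 c4', List.foldl_nil, List.nil_append]
      simp [aRec]
    · simp only [PySem.List.enumerate_cons, List.foldl_cons, PySem.List.enumerate_nil,
        pvBody_mid _ _ _ _ c1, pvBody_mid _ _ _ _ c2, pvBody_mid _ _ _ _ c3,
        pvBody_flush4 _ _ _ _ c4 c4', pvBody_mid _ _ _ _ c5, List.foldl_nil, List.nil_append]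
      simp [aRec]
    · simp only [PySem.List.enumerate_cons, List.foldl_cons, PySem.List.enumerate_nil,
        pvBody_mid _ _ _ _ c1, pvBody_mid _ _ _ _ c2, pvBody_mid _ _ _ _ c3,
        pvBody_flush4 _ _ _ _ c4 c4', pvBody_mid _ _ _ _ c5, pvBody_mid _ _ _ _ c6,
        List.foldl_nil, List.nil_append]
      simp [aRec]
    · simp only [PySem.List.enumerate_cons, List.foldl_cons, PySem.List.enumerate_nil,
        pvBody_mid _ _ _ _ c1, pvBody_mid _ _ _ _ c2, pvBody_mid _ _ _ _ c3,
        pvBody_flush4 _ _ _ _ c4 c4', pvBody_mid _ _ _ _ c5, pvBody_mid _ _ _ _ c6,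
        pvBody_mid _ _ _ _ c7, List.foldl_nil, List.nil_append]
      simp [aRec]
    · exact absurd rfl (hshape a b c d e f g h t)

theorem portA_eq (in_bit : String) :
    bit_to_byte in_bit = String.ofList (aRec ((PySem.Str.replace in_bit " " "").toList)) := by
  have key : ∀ (l : List Char),
      ((PySem.List.pyRange 0 (PySem.List.len l) 1).foldl
        (fun (st : List Char × List Char) i =>
          let curr := st.1 ++ [PySem.List.pyGetD l i ' ']
          if PySem.Int.mod (i + 1) 4 = 0 then
            let acc := st.2 ++ PySem.Dict.getD pvBB curr []
            let acc := if PySem.Int.mod (i + 1) 8 = 0 ∧ (i + 1) ≠ PySem.List.len l then acc ++ [' '] else acc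
            ([], acc)
          else (curr, st.2)) ([], [])).2 = aRec l := by
    intro l
    have h1 := pv_aux (PySem.List.len l) l 0 [] (by norm_num) (by simp)
    rw [Nat.cast_zero] at h1
    rw [PySem.List.enumerate_eq_map_pyRange l ' ', List.foldl_map] at h1
    simp only [List.nil_append] at h1
    exact h1
  simp only [bit_to_byte]
  rw [key]

-- generic regrouping of a range-of-slices map into the nibble list
theorem range_nibs (f : List Char → List Char) (l : List Char) :
    (List.range (l.length/4)).map (fun kk => f ((l.drop (4*kk)).take 4)) = (nibs l).map f := by
  induction l using nibs.induct with
  | case1 a b c d t ih =>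
    rw [show (a::b::c::d::t).length/4 = t.length/4 + 1 by simp [List.length_cons]; omega]
    rw [List.range_succ_eq_map, List.map_cons, List.map_map]
    have hdrop : ∀ kk : Nat, (a::b::c::d::t).drop (4*(kk+1)) = t.drop (4*kk) := by
      intro kk
      rw [show 4*(kk+1) = 4*kk+1+1+1+1 by ring]
      simp [List.drop_succ_cons]
    calc f (((a::b::c::d::t).drop (4*0)).take 4) ::
          (List.range (t.length/4)).map ((fun kk => f (((a::b::c::d::t).drop (4*kk)).take 4)) ∘ (· + 1))
        = f [a,b,c,d] :: (List.range (t.length/4)).map (fun kk => f ((t.drop (4*kk)).take 4)) := by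
          refine congrArg₂ List.cons (by simp) (List.map_congr_left fun kk _ => ?_)
          simp only [Function.comp_apply, hdrop kk]
      _ = (nibs (a::b::c::d::t)).map f := by rw [ih]; simp [nibs]
  | case2 t hshape =>
    rcases t with _ | ⟨a, _ | ⟨b, _ | ⟨c, t⟩⟩⟩
    · simp [nibs]
    · simp [nibs]
    · simp [nibs]
    · rcases t with _ | ⟨d, t⟩
      · simp [nibs]
      · exact absurd rfl (hshape a b c d t)

-- the two per-nibble digit computations agree on bit nibbles
theorem bit4 (a b c d : Char)
    (ha : a = '0' ∨ a = '1') (hb : b = '0' ∨ b = '1')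
    (hc : c = '0' ∨ c = '1') (hd : d = '0' ∨ d = '1') :
    bDigit [a, b, c, d] = hexNib [a, b, c, d] := by
  rcases ha with rfl | rfl <;> rcases hb with rfl | rfl <;>
    rcases hc with rfl | rfl <;> rcases hd with rfl | rfl <;> decide

-- under Pre_ (every complete nibble is made of bits), B's digits equal A's dict lookups
theorem nibs_bits (l : List Char)
    (h : ((l.take (4 * (l.length / 4))).all (fun c => c == '0' || c == '1')) = true) :
    (nibs l).map bDigit = (nibs l).map hexNib := by
  induction l using nibs.induct with
  | case1 a b c d t ih =>
    have e4 : 4 * ((a::b::c::d::t).length / 4) = 4 * (t.length / 4) + 1 + 1 + 1 + 1 := by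
      simp [List.length_cons]; omega
    rw [e4] at h
    simp only [List.take_succ_cons, List.all_cons, Bool.and_eq_true, Bool.or_eq_true,
      beq_iff_eq] at h
    obtain ⟨ha, hb, hc, hd, ht⟩ := h
    simp only [nibs, List.map_cons]
    rw [bit4 a b c d ha hb hc hd, ih ht]
  | case2 t hshape =>
    rcases t with _ | ⟨a, _ | ⟨b, _ | ⟨c, t⟩⟩⟩
    · simp [nibs]
    · simp [nibs]
    · simp [nibs]
    · rcases t with _ | ⟨d, t⟩
      · simp [nibs]
      · exact absurd rfl (hshape a b c d t)

theorem nibs_len (l : List Char) : (nibs l).length = l.length / 4 := by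
  induction l using nibs.induct with
  | case1 a b c d t ih => simp only [nibs, List.length_cons, ih]; omega
  | case2 t hshape =>
    rcases t with _ | ⟨a, _ | ⟨b, _ | ⟨c, t⟩⟩⟩
    · simp [nibs]
    · simp [nibs]
    · simp [nibs]
    · rcases t with _ | ⟨d, t⟩
      · simp [nibs]
      · exact absurd rfl (hshape a b c d t)

-- B's digit list equals (nibs l).map hexNib under Pre_
theorem digits_eq (l : List Char)
    (h : ((l.take (4 * (l.length / 4))).all (fun c => c == '0' || c == '1')) = true) :
    (PySem.List.pyRange 0 (PySem.Int.floordiv (PySem.List.len l) 4) 1).map (fun k =>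
      [PySem.List.pyGetD pvHex
        ((PySem.List.slice l (some (4*k)) (some (4*k + 4))).foldl
          (fun v c => 2*v + (if c = '1' then 1 else 0)) (0:Int)) ' ']) =
    (nibs l).map hexNib := by
  rw [PySem.List.len_eq, PySem.Int.floordiv_eq_ediv_of_pos (by norm_num),
    PySem.List.pyRange_of_pos _ _ (by norm_num)]
  rw [show (if (0:Int) < (l.length:Int)/4 then (((l.length:Int)/4 - 0 + 1 - 1)/1).toNat else 0)
        = l.length/4 by split_ifs <;> omega]
  rw [List.map_map]
  have hsl : ∀ kk : Nat,
      PySem.List.slice l (some (4*((0:Int) + 1*(kk:Int)))) (some (4*((0:Int) + 1*(kk:Int)) + 4))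
        = (l.drop (4*kk)).take 4 := by
    intro kk
    have hh := PySem.List.slice_natCast_add l (4*kk) 4
    push_cast at hh ⊢
    simpa using hh
  refine Eq.trans (Eq.trans (List.map_congr_left fun kk _ => ?_) (range_nibs bDigit l))
    (nibs_bits l h)
  simp only [Function.comp_apply, hsl kk]
  rfl

theorem range_chunk2 (hs : List (List Char)) :
    (List.range ((hs.length+1)/2)).map (fun j => ((hs.drop (2*j)).take 2).flatten) = chunk2 hs := by
  induction hs using chunk2.induct with
  | case1 h1 h2 t ih =>
    rw [show (h1::h2::t : List (List Char)).length+1 = (t.length+1) + 2 by simp [List.length_cons]]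
    rw [show ((t.length+1)+2)/2 = (t.length+1)/2 + 1 by omega]
    rw [List.range_succ_eq_map, List.map_cons, List.map_map]
    have hdrop : ∀ j : Nat, (h1::h2::t : List (List Char)).drop (2*(j+1)) = t.drop (2*j) := by
      intro j
      rw [show 2*(j+1) = 2*j+1+1 by ring]
      simp [List.drop_succ_cons]
    calc (((h1::h2::t : List (List Char)).drop (2*0)).take 2).flatten ::
          (List.range ((t.length+1)/2)).map ((fun j => (((h1::h2::t).drop (2*j)).take 2).flatten) ∘ (· + 1))
        = (h1 ++ h2) :: (List.range ((t.length+1)/2)).map (fun j => ((t.drop (2*j)).take 2).flatten) := by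
          refine congrArg₂ List.cons (by simp) (List.map_congr_left fun j _ => ?_)
          simp only [Function.comp_apply, hdrop j]
      _ = chunk2 (h1::h2::t) := by rw [ih]; simp [chunk2]
  | case2 h => simp [chunk2]
  | case3 => simp [chunk2]

theorem pairs_eq (hs : List (List Char)) :
    (PySem.List.pyRange 0 (PySem.List.len hs) 2).map
      (fun j => (PySem.List.slice hs (some j) (some (j + 2))).flatten) = chunk2 hs := by
  rw [PySem.List.len_eq, PySem.List.pyRange_of_pos _ _ (by norm_num)]
  rw [show (if (0:Int) < (hs.length:Int) then (((hs.length:Int) - 0 + 2 - 1)/2).toNat else 0)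
        = (hs.length+1)/2 by split_ifs <;> omega]
  rw [List.map_map]
  have hsl : ∀ j : Nat, PySem.List.slice hs (some ((0:Int) + 2*(j:Int))) (some ((0:Int) + 2*(j:Int) + 2))
      = (hs.drop (2*j)).take 2 := by
    intro j
    have h := PySem.List.slice_natCast_add hs (2*j) 2
    push_cast at h
    simpa using h
  refine Eq.trans (List.map_congr_left fun j _ => ?_) (range_chunk2 hs)
  simp only [Function.comp_apply]
  rw [hsl j]

theorem chunk2_cons_ne_nil (u : List Char) (s : List (List Char)) : chunk2 (u :: s) ≠ [] := by
  cases s <;> simp [chunk2]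

theorem join_chunk2 (hs : List (List Char)) :
    PySem.Chars.join [' '] (chunk2 hs) = bRecH hs := by
  induction hs using bRecH.induct with
  | case1 h1 h2 t ih =>
    rcases t with _ | ⟨u, s⟩
    · simp [chunk2, bRecH, PySem.Chars.join_singleton]
    · obtain ⟨y, ys, hy⟩ := List.exists_cons_of_ne_nil (chunk2_cons_ne_nil u s)
      calc PySem.Chars.join [' '] (chunk2 (h1 :: h2 :: u :: s))
          = (h1 ++ h2) ++ [' '] ++ PySem.Chars.join [' '] (chunk2 (u :: s)) := by
            simp only [chunk2, hy, PySem.Chars.join_cons_cons]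
        _ = bRecH (h1 :: h2 :: u :: s) := by
            rw [ih]
            simp [bRecH, List.append_assoc]
  | case2 h => simp [chunk2, bRecH, PySem.Chars.join_singleton]
  | case3 => simp [chunk2, bRecH, PySem.Chars.join_nil]

theorem portB_eq (in_bit : String) (hpre : Pre_bit_to_byte in_bit) :
    bit_to_byte_alt in_bit =
      String.ofList (bRecH ((nibs ((PySem.Str.replace in_bit " " "").toList)).map hexNib)) := by
  unfold Pre_bit_to_byte at hpre
  simp only [bit_to_byte_alt]
  rw [digits_eq _ hpre]
  have hn : PySem.Int.floordiv (PySem.List.len ((PySem.Str.replace in_bit " " "").toList)) 4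
      = PySem.List.len ((nibs ((PySem.Str.replace in_bit " " "").toList)).map hexNib) := by
    rw [PySem.List.len_eq, PySem.List.len_eq, PySem.Int.floordiv_eq_ediv_of_pos (by norm_num)]
    simp only [List.length_map, nibs_len]
    omega
  rw [hn, pairs_eq, join_chunk2]

theorem pvD_add8 (n : Nat) (h : 4 ≤ n) : pvD (n+8) = pvD n := by
  simp only [pvD]
  have e1 : (n+8) % 4 = n % 4 := by omega
  have e2 : (n+8) / 4 % 2 = n / 4 % 2 := by omega
  rw [e1, e2, decide_eq_true (show 8 ≤ n+8 by omega)]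
  by_cases h1 : n % 4 = 0
  · simp [h1]
  · by_cases h2 : n / 4 % 2 = 0
    · have h8 : 8 ≤ n := by omega
      simp [h2, h8]
    · simp [h1, h2]

theorem a_eq_b_app (l : List Char) :
    aRec l = bRecH ((nibs l).map hexNib) ++ (if pvD l.length then [' '] else []) := by
  induction l using aRec.induct with
  | case1 a b c d e f g h t ih =>
    rcases t with _ | ⟨a1, _ | ⟨a2, _ | ⟨a3, _ | ⟨a4, s⟩⟩⟩⟩
    · simp [aRec, nibs, bRecH, pvD]
    · simp [aRec, nibs, bRecH, pvD, List.append_assoc]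
    · simp [aRec, nibs, bRecH, pvD, List.append_assoc]
    · simp [aRec, nibs, bRecH, pvD, List.append_assoc]
    · have hlen : (a::b::c::d::e::f::g::h::a1::a2::a3::a4::s).length = (a1::a2::a3::a4::s).length + 8 := by
        simp [List.length_cons]
      rw [hlen, pvD_add8 _ (by simp [List.length_cons])]
      simp only [aRec, nibs]
      rw [ih]
      simp [nibs, bRecH, List.append_assoc]
  | case2 t hshape hlt =>
    rcases t with _ | ⟨a, _ | ⟨b, _ | ⟨c, t⟩⟩⟩
    · simp [aRec, nibs, bRecH, pvD]
    · simp [aRec, nibs, bRecH, pvD]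
    · simp [aRec, nibs, bRecH, pvD]
    · rcases t with _ | ⟨d, t⟩
      · simp [aRec, nibs, bRecH, pvD]
      · exact absurd hlt (by simp [List.length_cons])
  | case3 t hshape hge =>
    rcases t with _ | ⟨a, _ | ⟨b, _ | ⟨c, _ | ⟨d, _ | ⟨e, _ | ⟨f, _ | ⟨g, _ | ⟨h, t⟩⟩⟩⟩⟩⟩⟩⟩
    · simp at hge
    · simp at hge
    · simp at hge
    · simp at hge
    · simp [aRec, nibs, bRecH, pvD]
    · simp [aRec, nibs, bRecH, pvD]
    · simp [aRec, nibs, bRecH, pvD]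
    · simp [aRec, nibs, bRecH, pvD]
    · exact absurd rfl (hshape a b c d e f g h t)

theorem a_b_main (in_bit : String) (hpre : Pre_bit_to_byte in_bit) :
    bit_to_byte in_bit =
      String.ofList ((bit_to_byte_alt in_bit).toList ++
        (if pvD ((PySem.Str.replace in_bit " " "").toList).length then [' '] else [])) := by
  rw [portA_eq, portB_eq in_bit hpre, String.toList_ofList, a_eq_b_app]

-- ===== VERDICT (by name: the statement is the Claim_ definition above) =====
theorem bit_to_byte_spec : Claim_unchanged_bit_to_byte := by
  intro in_bit _ hpre
  unfold Spec_bit_to_byte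
  intro hnd
  unfold D_bit_to_byte at hnd
  rw [a_b_main in_bit hpre, Bool.not_eq_true] at *
  rw [hnd]
  simp [String.ofList_toList]

theorem bit_to_byte_changed : Claim_changed_bit_to_byte := by
  unfold Claim_changed_bit_to_byte
  refine ⟨by decide, by decide, by decide, by decide, by decide, by decide⟩

theorem bit_to_byte_tight : Claim_exact_bit_to_byte := by
  intro in_bit _ hpre hd heq
  unfold D_bit_to_byte at hd
  rw [a_b_main in_bit hpre, hd, if_pos rfl] at heq
  have := congrArg String.toList heq
  rw [String.toList_ofList] at this
  have hlen := congrArg List.length this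
  simp at hlen
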